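-- pv_equiv track=rewrite | github.com/souflex56/QAnchor | scripts/01_chunk_checklist.py | _page_gaps
-- ===== SOURCE A (Python) =====
-- from typing import Any, Dict, List
--
-- def _page_gaps(pages: List[int]) -> List[List[int]]:
--     gaps: List[List[int]] = []
--     if not pages:
--         return gaps
--     pages = sorted(set(pages))
--     for i in range(1, len(pages)):
--         if pages[i] - pages[i - 1] > 1:
--             gaps.append([pages[i - 1] + 1, pages[i] - 1])
--     return gaps
-- ===== SOURCE B (Python) =====
-- from typing import List
--
-- def _page_gaps(pages: List[int]) -> List[List[int]]:
--     present = set(pages)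
--     if not present:
--         return []
--     lo, hi = min(present), max(present)
--     starts = sorted(p + 1 for p in present if p != hi and p + 1 not in present)
--     ends = sorted(p - 1 for p in present if p != lo and p - 1 not in present)
--     return [[a, b] for a, b in zip(starts, ends)]
-- ===== Notes on version B (the rewrite author's own statement) =====
-- stated objective: alternative
-- what changed: Replaces the sorted-consecutive-pairs scan by set arithmetic: gap starts are the pages p (p != max) with p+1 absent from the page set, gap ends the pages p (p != min) with p-1 absent; the two sorted lists are zipped into the gap ranges.
import Mathlib
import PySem

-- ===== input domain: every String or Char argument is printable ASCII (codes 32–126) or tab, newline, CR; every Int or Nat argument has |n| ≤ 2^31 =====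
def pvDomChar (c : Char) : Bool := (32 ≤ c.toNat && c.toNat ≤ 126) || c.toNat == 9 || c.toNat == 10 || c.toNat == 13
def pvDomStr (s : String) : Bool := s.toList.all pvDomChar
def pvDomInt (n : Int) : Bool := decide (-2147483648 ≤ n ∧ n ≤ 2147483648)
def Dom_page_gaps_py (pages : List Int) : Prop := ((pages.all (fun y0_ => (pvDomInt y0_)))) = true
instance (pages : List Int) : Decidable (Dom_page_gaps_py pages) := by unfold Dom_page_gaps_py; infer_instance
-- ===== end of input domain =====

-- B re-implements the sorted-pairwise gap scan by set arithmetic (gap starts = p+1 with p+1 absent,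
-- gap ends = p-1 with p-1 absent, zipped after sorting); objective: alternative, same asymptotic cost.

-- ===== PORT A =====
def page_gaps_py (pages : List Int) : List (List Int) :=
  let gaps : List (List Int) := []
  if pages.isEmpty then gaps
  else
    let ps := PySem.List.sorted (PySem.Set.ofList pages) (fun x => x) false
    (PySem.List.pyRange 1 (ps.length : Int) 1).foldl
      (fun gaps i =>
        if PySem.List.pyGetD ps i 0 - PySem.List.pyGetD ps (i - 1) 0 > 1 then
          gaps ++ [[PySem.List.pyGetD ps (i - 1) 0 + 1, PySem.List.pyGetD ps i 0 - 1]]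
        else gaps) gaps

-- ===== PORT B =====
def page_gaps_py_alt (pages : List Int) : List (List Int) :=
  let present : PySem.Set Int := PySem.Set.ofList pages
  if present.isEmpty then []
  else
    match PySem.List.min? present (fun x => x), PySem.List.max? present (fun x => x) with
    | some lo, some hi =>
        let starts := PySem.List.sorted
          ((present.filter (fun p => p != hi && !(PySem.Set.contains present (p + 1)))).map
            (fun p => p + 1)) (fun x => x) false
        let ends := PySem.List.sorted
          ((present.filter (fun p => p != lo && !(PySem.Set.contains present (p - 1)))).map
            (fun p => p - 1)) (fun x => x) false
        (starts.zip ends).map (fun ab => [ab.1, ab.2])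
    | _, _ => []

-- ===== PRECONDITION & SPEC =====
def Spec_page_gaps_py (pages : List Int) (out : List (List Int)) : Prop := out = page_gaps_py_alt pages
instance (pages : List Int) (out : List (List Int)) : Decidable (Spec_page_gaps_py pages out) := by unfold Spec_page_gaps_py; infer_instance

-- ===== CLAIM (what is proved, stated in full; the proofs are below) =====
def Claim_equal_page_gaps_py : Prop := ∀ (pages : List Int), Dom_page_gaps_py pages → Spec_page_gaps_py pages (page_gaps_py pages)

-- ===== LEMMAS AND PROOFS =====

-- the consecutive pairs of the sorted page list that carry a gap
def pvGapPairs (L : List Int) : List (Int × Int) :=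
  (L.zip L.tail).filter (fun p => decide (p.2 - p.1 > 1))

theorem pv_range_zip : ∀ (L : List Int),
    (List.range (L.length - 1)).map (fun k => (L.getD k 0, L.getD (k + 1) 0)) = L.zip L.tail
  | [] => by simp
  | [x] => by simp
  | x :: y :: t => by
    have ih := pv_range_zip (y :: t)
    simp only [List.length_cons, Nat.add_sub_cancel] at ih ⊢
    rw [List.range_succ_eq_map]
    simp only [List.map_cons, List.map_map, List.getD_cons_zero, List.getD_cons_succ,
      List.tail_cons, List.zip_cons_cons]
    congr 1

theorem pv_A_eq (L : List Int) :
    (PySem.List.pyRange 1 (L.length : Int) 1).foldl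
      (fun gaps i =>
        if PySem.List.pyGetD L i 0 - PySem.List.pyGetD L (i - 1) 0 > 1 then
          gaps ++ [[PySem.List.pyGetD L (i - 1) 0 + 1, PySem.List.pyGetD L i 0 - 1]]
        else gaps) [] =
    (pvGapPairs L).map (fun p => [p.1 + 1, p.2 - 1]) := by
  have hfun : (fun (gaps : List (List Int)) (i : Int) =>
        if PySem.List.pyGetD L i 0 - PySem.List.pyGetD L (i - 1) 0 > 1 then
          gaps ++ [[PySem.List.pyGetD L (i - 1) 0 + 1, PySem.List.pyGetD L i 0 - 1]]
        else gaps) =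
      (fun gaps i =>
        if (fun i => decide (PySem.List.pyGetD L i 0 - PySem.List.pyGetD L (i - 1) 0 > 1)) i = true then
          gaps ++ [(fun i => [PySem.List.pyGetD L (i - 1) 0 + 1, PySem.List.pyGetD L i 0 - 1]) i]
        else gaps) := by
    funext gaps i; simp
  rw [hfun, PySem.List.foldl_append_if, PySem.List.pyRange_of_pos 1 (L.length : Int) (by norm_num)]
  have hcnt : (if (1:Int) < (L.length : Int) then (((L.length:Int) - 1 + 1 - 1) / 1).toNat else 0) = L.length - 1 := by
    split_ifs with h
    · omega
    · omega
  rw [hcnt]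
  rw [List.filter_map, List.map_map]
  unfold pvGapPairs
  rw [← pv_range_zip L, List.filter_map, List.map_map]
  simp only [List.nil_append]
  have h1 : ∀ (k : Nat), (1 + 1 * (k:Int)) = ((k+1:Nat):Int) := by intro k; push_cast; ring
  have h0 : ∀ (k : Nat), (((k+1:Nat):Int) - 1) = ((k:Nat):Int) := by intro k; push_cast; ring
  rw [List.filter_congr (fun k _ => by
    simp only [Function.comp_apply]
    rw [h1 k, h0 k, PySem.List.pyGetD_natCast, PySem.List.pyGetD_natCast])]
  apply List.map_congr_left
  intro k hk
  simp only [Function.comp_apply]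
  rw [h1 k, h0 k, PySem.List.pyGetD_natCast, PySem.List.pyGetD_natCast]

theorem pv_lefts : ∀ (M pre : List Int) (hi : Int),
    (pre ++ M).Pairwise (· < ·) → hi ∈ pre ++ M → (∀ q ∈ pre ++ M, q ≤ hi) →
    M.filter (fun p => p != hi && !(PySem.Set.contains (pre ++ M) (p + 1))) =
      (pvGapPairs M).map (·.1)
  | [], pre, hi, _, _, _ => by simp [pvGapPairs]
  | [x], pre, hi, hp, hmem, hub => by
    have hx : x = hi := by
      rcases List.mem_append.mp hmem with h | h
      · have h1 := (List.pairwise_append.mp hp).2.2 hi h x (by simp)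
        have h2 := hub x (by simp)
        omega
      · exact (List.mem_singleton.mp h).symm
    simp [pvGapPairs, hx]
  | x :: y :: t, pre, hi, hp, hmem, hub => by
    have hassoc : pre ++ x :: y :: t = (pre ++ [x]) ++ y :: t := by simp
    have ih := pv_lefts (y :: t) (pre ++ [x]) hi (by rw [← hassoc]; exact hp)
      (by rw [← hassoc]; exact hmem) (by rw [← hassoc]; exact hub)
    have hap := List.pairwise_append.mp hp
    have hxy : x < y := by
      have := List.pairwise_cons.mp hap.2.1
      exact this.1 y (by simp)
    have hyt : ∀ b ∈ t, y < b := by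
      have := List.pairwise_cons.mp (List.pairwise_cons.mp hap.2.1).2
      exact this.1
    have hxne : (x != hi) = true := by
      have hyle := hub y (by simp)
      simp only [bne_iff_ne, ne_eq]
      intro h; omega
    have hx1 : (x + 1) ∈ pre ++ x :: y :: t ↔ x + 1 = y := by
      constructor
      · intro h
        rcases List.mem_append.mp h with h | h
        · have := hap.2.2 (x+1) h x (by simp); omega
        · rcases List.mem_cons.mp h with h | h
          · omega
          · rcases List.mem_cons.mp h with h | h
            · exact h
            · have := hyt _ h; omega
      · intro h; simp [h]
    have hcont : PySem.Set.contains (pre ++ x :: y :: t) (x + 1) = decide (x + 1 = y) := by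
      rw [Bool.eq_iff_iff]
      simp [PySem.Set.contains, hx1]
    rw [List.filter_cons]
    rw [show pvGapPairs (x :: y :: t) =
        (if decide (y - x > 1) = true then [(x, y)] else []) ++ pvGapPairs (y :: t) by
      simp only [pvGapPairs, List.zip_cons_cons, List.tail_cons, List.filter_cons]
      split_ifs <;> simp]
    rw [List.map_append]
    have hpred : (x != hi && !PySem.Set.contains (pre ++ x :: y :: t) (x + 1)) = decide (y - x > 1) := by
      rw [hxne, hcont]
      rcases Decidable.em (x + 1 = y) with h | h
      · simp [h]; omega
      · simp [h]; omega
    rw [hpred]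
    have htail : List.filter (fun p => p != hi && !PySem.Set.contains (pre ++ x :: y :: t) (p + 1)) (y :: t)
        = (pvGapPairs (y :: t)).map (·.1) := by
      rw [hassoc]; exact ih
    split_ifs with hgt
    · rw [htail]; simp
    · rw [htail]; simp

theorem pv_rights : ∀ (M pre : List Int) (x lo : Int),
    (pre ++ x :: M).Pairwise (· < ·) → lo ∈ pre ++ x :: M → (∀ q ∈ pre ++ x :: M, lo ≤ q) →
    M.filter (fun p => p != lo && !(PySem.Set.contains (pre ++ x :: M) (p - 1))) =
      (((x :: M).zip M).filter (fun p => decide (p.2 - p.1 > 1))).map (·.2)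
  | [], pre, x, lo, _, _, _ => by simp
  | y :: t, pre, x, lo, hp, hmem, hlb => by
    have hassoc : pre ++ x :: y :: t = (pre ++ [x]) ++ y :: t := by simp
    have ih := pv_rights t (pre ++ [x]) y lo (by rw [← hassoc]; exact hp)
      (by rw [← hassoc]; exact hmem) (by rw [← hassoc]; exact hlb)
    have hap := List.pairwise_append.mp hp
    have hxy : x < y := (List.pairwise_cons.mp hap.2.1).1 y (by simp)
    have hyt : ∀ b ∈ t, y < b :=
      (List.pairwise_cons.mp (List.pairwise_cons.mp hap.2.1).2).1
    have hyne : (y != lo) = true := by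
      have := hlb x (by simp)
      simp only [bne_iff_ne, ne_eq]
      intro h; omega
    have hy1 : (y - 1) ∈ pre ++ x :: y :: t ↔ y - 1 = x := by
      constructor
      · intro h
        rcases List.mem_append.mp h with h | h
        · have := hap.2.2 (y-1) h x (by simp); omega
        · rcases List.mem_cons.mp h with h | h
          · exact h
          · rcases List.mem_cons.mp h with h | h
            · omega
            · have := hyt _ h; omega
      · intro h; rw [h]; simp
    have hcont : PySem.Set.contains (pre ++ x :: y :: t) (y - 1) = decide (y - 1 = x) := by
      rw [Bool.eq_iff_iff]
      simp [PySem.Set.contains, hy1]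
    rw [List.filter_cons]
    rw [show ((x :: y :: t).zip (y :: t)).filter (fun p => decide (p.2 - p.1 > 1)) =
        (if decide (y - x > 1) = true then [(x, y)] else []) ++
          ((y :: t).zip t).filter (fun p => decide (p.2 - p.1 > 1)) by
      simp only [List.zip_cons_cons, List.filter_cons]
      split_ifs <;> simp]
    rw [List.map_append]
    have hpred : (y != lo && !PySem.Set.contains (pre ++ x :: y :: t) (y - 1)) = decide (y - x > 1) := by
      rw [hyne, hcont]
      rcases Decidable.em (y - 1 = x) with h | h
      · simp [h]; omega
      · simp [h]; omega
    rw [hpred]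
    have htail : List.filter (fun p => p != lo && !PySem.Set.contains (pre ++ x :: y :: t) (p - 1)) t
        = (((y :: t).zip t).filter (fun p => decide (p.2 - p.1 > 1))).map (·.2) := by
      rw [hassoc]; exact ih
    split_ifs with hgt
    · rw [htail]; simp
    · rw [htail]; simp

theorem pv_main (pages : List Int) : page_gaps_py pages = page_gaps_py_alt pages := by
  unfold page_gaps_py page_gaps_py_alt
  by_cases hemp : pages.isEmpty
  · have : pages = [] := List.isEmpty_iff.mp hemp
    subst this
    rfl
  · have hpne : pages ≠ [] := fun h => hemp (by simp [h])
    have hsne : PySem.Set.ofList pages ≠ [] := by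
      intro h
      rcases List.exists_mem_of_ne_nil pages hpne with ⟨a, ha⟩
      have : a ∈ PySem.Set.ofList pages := (PySem.Set.mem_ofList pages a).mpr ha
      simp [h] at this
    have hsemp : (PySem.Set.ofList pages).isEmpty = false := by
      simpa [List.isEmpty_iff] using hsne
    simp only [hemp, hsemp, Bool.false_eq_true, if_false]
    obtain ⟨lo, hmin⟩ : ∃ lo, PySem.List.min? (PySem.Set.ofList pages) (fun x => x) = some lo := by
      rcases h : PySem.List.min? (PySem.Set.ofList pages) (fun x => x) with _ | lo
      · exact absurd ((PySem.List.min?_eq_none_iff _ _).mp h) hsne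
      · exact ⟨lo, rfl⟩
    obtain ⟨hi, hmax⟩ : ∃ hi, PySem.List.max? (PySem.Set.ofList pages) (fun x => x) = some hi := by
      rcases h : PySem.List.max? (PySem.Set.ofList pages) (fun x => x) with _ | hi
      · exact absurd ((PySem.List.max?_eq_none_iff _ _).mp h) hsne
      · exact ⟨hi, rfl⟩
    rw [hmin, hmax]
    set present := PySem.Set.ofList pages with hpres
    set L := PySem.List.sorted present (fun x => x) false with hL
    have hperm : L.Perm present := PySem.List.sorted_perm present (fun x => x) false
    have hlt : L.Pairwise (· < ·) := PySem.List.sorted_ofList_pairwise_lt pages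
    have hLne : L ≠ [] := by
      intro h
      apply hsne
      have := hperm
      rw [h] at this
      exact (this.symm.eq_nil)
    obtain ⟨x, M, hLxM⟩ : ∃ x M, L = x :: M := by
      rcases hL' : L with _ | ⟨x, M⟩
      · exact absurd hL' hLne
      · exact ⟨x, M, rfl⟩
    -- extremum facts, transported to the sorted list L
    have hhiL : hi ∈ L := hperm.mem_iff.mpr (PySem.List.max?_mem hmax)
    have hubL : ∀ q ∈ L, q ≤ hi := fun q hq => PySem.List.max?_isMax hmax q (hperm.subset hq)
    have hloL : lo ∈ L := hperm.mem_iff.mpr (PySem.List.min?_mem hmin)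
    have hlbL : ∀ q ∈ L, lo ≤ q := fun q hq => PySem.List.min?_isMin hmin q (hperm.subset hq)
    have hcontEq : ∀ q, PySem.Set.contains present q = PySem.Set.contains L q := by
      intro q
      rw [Bool.eq_iff_iff]
      simp [PySem.Set.contains, hperm.mem_iff]
    -- the starts filter over L
    have hstartsL : L.filter (fun p => p != hi && !(PySem.Set.contains L (p + 1))) =
        (pvGapPairs L).map (·.1) := by
      have h := pv_lefts L [] hi (by simpa using hlt) (by simpa using hhiL) (by simpa using hubL)
      simpa using h
    -- the ends filter over L
    have hlox : lo = x := by
      have hlt' := hlt; rw [hLxM] at hlt'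
      have hxM : ∀ b ∈ M, x < b := (List.pairwise_cons.mp hlt').1
      have hloL' := hloL; rw [hLxM] at hloL'
      rcases List.mem_cons.mp hloL' with h | h
      · exact h
      · have h1 := hxM lo h
        have h2 := hlbL x (by rw [hLxM]; simp)
        omega
    have hendsL : L.filter (fun p => p != lo && !(PySem.Set.contains L (p - 1))) =
        (pvGapPairs L).map (·.2) := by
      rw [hLxM, List.filter_cons]
      have hx : (x != lo && !(PySem.Set.contains L (x - 1))) = false := by
        simp [hlox]
      rw [hLxM] at hx
      rw [hx]
      have hlt' := hlt; rw [hLxM] at hlt'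
      have hloL' := hloL; rw [hLxM] at hloL'
      have hlbL' : ∀ q ∈ x :: M, lo ≤ q := by rw [← hLxM]; exact hlbL
      have h := pv_rights M [] x lo (by simpa using hlt') (by simpa using hloL') (by simpa using hlbL')
      simp only [List.nil_append] at h
      rw [h]
      simp [pvGapPairs]
    -- name the two sorted lists in B
    have hSpair : ((L.filter (fun p => p != hi && !(PySem.Set.contains L (p + 1)))).map
        (fun p => p + 1)).Pairwise (· < ·) := by
      rw [List.pairwise_map]
      exact (hlt.filter _).imp (by omega)
    have hEpair : ((L.filter (fun p => p != lo && !(PySem.Set.contains L (p - 1)))).map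
        (fun p => p - 1)).Pairwise (· < ·) := by
      rw [List.pairwise_map]
      exact (hlt.filter _).imp (by omega)
    have hfiltS : (present.filter (fun p => p != hi && !(PySem.Set.contains present (p + 1)))) =
        (present.filter (fun p => p != hi && !(PySem.Set.contains L (p + 1)))) := by
      apply List.filter_congr
      intro p _
      rw [hcontEq]
    have hfiltE : (present.filter (fun p => p != lo && !(PySem.Set.contains present (p - 1)))) =
        (present.filter (fun p => p != lo && !(PySem.Set.contains L (p - 1)))) := by
      apply List.filter_congr
      intro p _
      rw [hcontEq]
    have hstarts : PySem.List.sorted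
        ((present.filter (fun p => p != hi && !(PySem.Set.contains present (p + 1)))).map
          (fun p => p + 1)) (fun x => x) false =
        (pvGapPairs L).map (fun p => p.1 + 1) := by
      rw [hfiltS]
      have := PySem.List.sorted_eq_of_perm_of_pairwise_lt
        ((present.filter (fun p => p != hi && !(PySem.Set.contains L (p + 1)))).map (fun p => p + 1))
        ((L.filter (fun p => p != hi && !(PySem.Set.contains L (p + 1)))).map (fun p => p + 1))
        (fun x => x) ((hperm.filter _).map _) hSpair
      rw [this, hstartsL, List.map_map]
      rfl
    have hends : PySem.List.sorted
        ((present.filter (fun p => p != lo && !(PySem.Set.contains present (p - 1)))).map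
          (fun p => p - 1)) (fun x => x) false =
        (pvGapPairs L).map (fun p => p.2 - 1) := by
      rw [hfiltE]
      have := PySem.List.sorted_eq_of_perm_of_pairwise_lt
        ((present.filter (fun p => p != lo && !(PySem.Set.contains L (p - 1)))).map (fun p => p - 1))
        ((L.filter (fun p => p != lo && !(PySem.Set.contains L (p - 1)))).map (fun p => p - 1))
        (fun x => x) ((hperm.filter _).map _) hEpair
      rw [this, hendsL, List.map_map]
      rfl
    rw [pv_A_eq L]
    simp only [hstarts, hends, List.zip_map', List.map_map]
    rfl

-- ===== VERDICT (by name: the statement is the Claim_ definition above) =====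
theorem page_gaps_py_spec : Claim_equal_page_gaps_py := by
  intro pages _
  exact pv_main pages
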